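-- pv_equiv track=rewrite | github.com/jjiwoning/Code_Test | python_algo/baekjoon/13305.py | solution
-- ===== SOURCE A (Python) =====
-- def solution(city, meter, price):
--     answer = 0
--     i = 0
--     while i < city - 1:
--         if price[i] <= price[i + 1]:
--             price[i + 1] = price[i]
--         answer += meter[i] * price[i]
--         i += 1
--     return answer
-- ===== SOURCE B (Python) =====
-- def solution(city, meter, price):
--     # Divide and conquer on the position of the cheapest city, using prefix sums
--     # of meter; A mutates `price` in place, B does not (return value is identical).
--     n = city - 1
--     if n <= 0:
--         return 0
--     psum = [0]
--     for x in meter[:n]: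
--         psum.append(psum[-1] + x)
--     def cost(r):
--         # total cost of the first r road segments
--         if r == 0:
--             return 0
--         pre = price[:r]
--         v = min(pre)
--         m = pre.index(v)
--         # from city m on, every segment up to r is bought at price v
--         return cost(m) + v * (psum[r] - psum[m])
--     return cost(n)
-- ===== Notes on version B (the rewrite author's own statement) =====
-- stated objective: alternative
-- what changed: A's single left-to-right scan carrying a running minimum (mutating price in place) is replaced by a divide-and-conquer: find the position m of the cheapest price in the prefix, charge that price times the meter prefix-sum difference psum[r]-psum[m] for the whole block [m,r), and recurse on [0,m); B does not mutate price (equivalence is about the return value).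
import Mathlib
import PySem

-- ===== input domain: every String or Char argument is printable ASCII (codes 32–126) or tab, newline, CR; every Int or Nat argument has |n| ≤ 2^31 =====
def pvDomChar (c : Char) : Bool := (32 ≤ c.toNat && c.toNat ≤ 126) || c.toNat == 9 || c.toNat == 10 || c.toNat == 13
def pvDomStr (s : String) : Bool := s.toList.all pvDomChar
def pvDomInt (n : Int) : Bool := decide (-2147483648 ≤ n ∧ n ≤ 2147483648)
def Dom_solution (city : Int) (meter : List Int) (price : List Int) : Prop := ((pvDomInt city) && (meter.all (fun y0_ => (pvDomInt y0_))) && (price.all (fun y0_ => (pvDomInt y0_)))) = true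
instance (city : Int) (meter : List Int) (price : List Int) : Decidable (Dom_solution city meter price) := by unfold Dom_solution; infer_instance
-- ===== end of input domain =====

-- B replaces A's running-minimum scan by a divide-and-conquer on the position of the
-- cheapest price, with prefix sums of meter (objective: alternative). A mutates `price`
-- in place, B does not: the equivalence proved here is about the RETURN value only.

-- ===== PORT A =====
-- A's while loop: fuel = number of remaining iterations, state (i, answer, price)
def solutionLoop (meter : List Int) : Nat → Nat → Int → List Int → Int
  | 0, _, answer, _ => answer
  | k + 1, i, answer, price =>
    let price' :=
      if PySem.List.pyGetD price (i : Int) 0 ≤ PySem.List.pyGetD price ((i : Int) + 1) 0 then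
        PySem.List.pySetD price ((i : Int) + 1) (PySem.List.pyGetD price (i : Int) 0)
      else price
    solutionLoop meter k (i + 1)
      (answer + PySem.List.pyGetD meter (i : Int) 0 * PySem.List.pyGetD price' (i : Int) 0) price'

def solution (city : Int) (meter : List Int) (price : List Int) : Int :=
  solutionLoop meter (city - 1).toNat 0 0 price

-- ===== PORT B =====
-- psum = [0]; for x in meter[:n]: psum.append(psum[-1] + x)
def psumB (xs : List Int) : List Int :=
  xs.foldl (fun ps x => ps ++ [PySem.List.pyGetD ps (-1) 0 + x]) [0]

-- cost(r), fuel-guarded (the recursive call is at m < r ≤ fuel, so the guard never fires)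
def costB (price psum : List Int) : Nat → Nat → Int
  | 0, _ => 0
  | fuel + 1, r =>
    if r = 0 then 0
    else
      let pre := PySem.List.slice price none (some (r : Int))
      let v := (PySem.List.min? pre (fun x => x)).getD 0
      let m := (PySem.List.index? pre v).getD 0
      costB price psum fuel m +
        v * (PySem.List.pyGetD psum (r : Int) 0 - PySem.List.pyGetD psum (m : Int) 0)

def solution_alt (city : Int) (meter : List Int) (price : List Int) : Int :=
  if city - 1 ≤ 0 then 0
  else
    costB price (psumB (PySem.List.slice meter none (some (city - 1))))
      (city - 1).toNat (city - 1).toNat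

-- ===== PRECONDITION & SPEC =====
-- Pre_ excludes exactly the inputs where Python A raises IndexError (meter or price too short).
def Pre_solution (city : Int) (meter : List Int) (price : List Int) : Prop :=
  city ≤ 1 ∨ (city - 1 ≤ (meter.length : Int) ∧ city ≤ (price.length : Int))
instance (city : Int) (meter : List Int) (price : List Int) : Decidable (Pre_solution city meter price) := by unfold Pre_solution; infer_instance

def pvWitness_solution : Int × List Int × List Int := (4, [2, 3, 1], [5, 2, 4, 1])

def Spec_solution (city : Int) (meter : List Int) (price : List Int) (out : Int) : Prop := out = solution_alt city meter price
instance (city : Int) (meter : List Int) (price : List Int) (out : Int) : Decidable (Spec_solution city meter price out) := by unfold Spec_solution; infer_instance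

-- ===== CLAIM (what is proved, stated in full; the proofs are below) =====
def Claim_equal_solution : Prop := ∀ (city : Int) (meter : List Int) (price : List Int), Dom_solution city meter price → Pre_solution city meter price → Spec_solution city meter price (solution city meter price)

-- ===== LEMMAS AND PROOFS =====

-- prefix minimum of price[0..i]
def pm (price : List Int) : Nat → Int
  | 0 => price.getD 0 0
  | j + 1 => min (pm price j) (price.getD (j + 1) 0)

-- reference sum: k terms meter[j] * pm(j) starting at j = i
def S (meter price : List Int) (i : Nat) : Nat → Int
  | 0 => 0
  | k + 1 => meter.getD i 0 * pm price i + S meter price (i + 1) k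

-- sum of k entries of xs from index i
def msum (xs : List Int) (i : Nat) : Nat → Int
  | 0 => 0
  | k + 1 => xs.getD i 0 + msum xs (i + 1) k

theorem pm_le (price : List Int) (i j : Nat) (h : j ≤ i) : pm price i ≤ price.getD j 0 := by
  induction i with
  | zero => interval_cases j; simp [pm]
  | succ i ih =>
    rcases Nat.lt_or_ge j (i + 1) with hj | hj
    · exact le_trans (min_le_left _ _) (ih (by omega))
    · have hji : j = i + 1 := by omega
      subst hji; exact min_le_right _ _

theorem pm_mem (price : List Int) (i : Nat) : ∃ j, j ≤ i ∧ pm price i = price.getD j 0 := by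
  induction i with
  | zero => exact ⟨0, le_refl _, rfl⟩
  | succ i ih =>
    obtain ⟨j, hj, hpj⟩ := ih
    rcases le_total (pm price i) (price.getD (i + 1) 0) with h | h
    · exact ⟨j, by omega, by rw [show pm price (i+1) = min (pm price i) (price.getD (i+1) 0) from rfl, min_eq_left h, hpj]⟩
    · exact ⟨i + 1, le_refl _, by rw [show pm price (i+1) = min (pm price i) (price.getD (i+1) 0) from rfl, min_eq_right h]⟩

theorem S_split (meter price : List Int) (i k1 k2 : Nat) :
    S meter price i (k1 + k2) = S meter price i k1 + S meter price (i + k1) k2 := by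
  induction k1 generalizing i with
  | zero => simp [S]
  | succ k1 ih =>
    have h1 : k1 + 1 + k2 = (k1 + k2) + 1 := by omega
    rw [h1]
    show meter.getD i 0 * pm price i + S meter price (i + 1) (k1 + k2) = _
    rw [ih]
    show _ = meter.getD i 0 * pm price i + S meter price (i + 1) k1 + S meter price (i + (k1 + 1)) k2
    have h2 : i + (k1 + 1) = i + 1 + k1 := by omega
    rw [h2]; ring

theorem S_const (meter price : List Int) (v : Int) (i k : Nat)
    (h : ∀ j, i ≤ j → j < i + k → pm price j = v) :
    S meter price i k = v * msum meter i k := by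
  induction k generalizing i with
  | zero => simp [S, msum]
  | succ k ih =>
    show meter.getD i 0 * pm price i + S meter price (i + 1) k = v * (meter.getD i 0 + msum meter (i + 1) k)
    rw [h i (le_refl _) (by omega), ih (i + 1) (fun j h1 h2 => h j (by omega) (by omega))]
    ring

theorem msum_succ_right (xs : List Int) (i k : Nat) :
    msum xs i (k + 1) = msum xs i k + xs.getD (i + k) 0 := by
  induction k generalizing i with
  | zero => simp [msum]
  | succ k ih =>
    show xs.getD i 0 + msum xs (i + 1) (k + 1) = xs.getD i 0 + msum xs (i + 1) k + xs.getD (i + (k + 1)) 0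
    rw [ih]
    have : i + 1 + k = i + (k + 1) := by omega
    rw [this]; ring

theorem msum_congr (xs ys : List Int) (i k : Nat)
    (h : ∀ j, i ≤ j → j < i + k → xs.getD j 0 = ys.getD j 0) :
    msum xs i k = msum ys i k := by
  induction k generalizing i with
  | zero => rfl
  | succ k ih =>
    show xs.getD i 0 + msum xs (i + 1) k = ys.getD i 0 + msum ys (i + 1) k
    rw [h i (le_refl _) (by omega), ih (i + 1) (fun j h1 h2 => h j (by omega) (by omega))]

theorem take_sum_msum (xs : List Int) (i k : Nat) (h : i + k ≤ xs.length) :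
    (xs.take (i + k)).sum = (xs.take i).sum + msum xs i k := by
  induction k with
  | zero => simp [msum]
  | succ k ih =>
    have hk : i + k < xs.length := by omega
    have h1 : i + (k + 1) = (i + k) + 1 := by omega
    rw [h1, List.sum_take_succ _ _ hk, ih (by omega), msum_succ_right]
    have : xs.getD (i + k) 0 = xs[i + k] := List.getD_eq_getElem _ _ hk
    rw [this]; ring

-- ---- A side ----
theorem loopA_eq (meter price0 : List Int) (k : Nat) :
    ∀ (i : Nat) (ans : Int) (p : List Int),
      i + k < p.length →
      p.getD i 0 = pm price0 i →
      (∀ j, i < j → p.getD j 0 = price0.getD j 0) →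
      solutionLoop meter k i ans p = ans + S meter price0 i k := by
  induction k with
  | zero => intro i ans p _ _ _; simp [solutionLoop, S]
  | succ k ih =>
    intro i ans p hik hcur htail
    have hi1 : i + 1 < p.length := by omega
    show solutionLoop meter k (i + 1) _ _ = _
    set a := PySem.List.pyGetD p (i : Int) 0 with ha
    set b := PySem.List.pyGetD p ((i : Int) + 1) 0 with hb
    have ha' : a = pm price0 i := by rw [ha, PySem.List.pyGetD_natCast]; exact hcur
    have hcast : ((i : Int) + 1) = ((i + 1 : Nat) : Int) := by push_cast; ring
    have hb' : b = price0.getD (i + 1) 0 := by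
      rw [hb, hcast, PySem.List.pyGetD_natCast]; exact htail (i + 1) (by omega)
    set p' := if a ≤ b then PySem.List.pySetD p ((i : Int) + 1) a else p with hp'
    have hlen' : p'.length = p.length := by
      rw [hp']; split_ifs <;> simp [PySem.List.length_pySetD]
    have hget : ∀ j : Nat, j ≠ i + 1 → p'.getD j 0 = p.getD j 0 := by
      intro j hj
      rw [hp']; split_ifs with h
      · rw [hcast, PySem.List.pySetD_natCast]
        simp [List.getD, List.getElem?_set_ne (Ne.symm hj)]
      · rfl
    have hpm : pm price0 (i + 1) = min a b := by
      rw [ha', hb']; rfl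
    have hnew : p'.getD (i + 1) 0 = pm price0 (i + 1) := by
      rw [hp']; split_ifs with h
      · rw [hcast, PySem.List.pySetD_natCast]
        rw [List.getD_eq_getElem _ _ (by simpa using hi1), List.getElem_set_self]
        rw [hpm, min_eq_left h]
      · rw [hpm, min_eq_right (le_of_not_ge h), hb, hcast, PySem.List.pyGetD_natCast]
    have hansstep : PySem.List.pyGetD p' (i : Int) 0 = pm price0 i := by
      rw [PySem.List.pyGetD_natCast, hget i (by omega), hcur]
    rw [ih (i + 1) _ p' (by omega) hnew
      (fun j hj => by rw [hget j (by omega)]; exact htail j (by omega))]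
    rw [hansstep, PySem.List.pyGetD_natCast]
    show ans + meter.getD i 0 * pm price0 i + S meter price0 (i + 1) k =
      ans + (meter.getD i 0 * pm price0 i + S meter price0 (i + 1) k)
    ring

-- ---- psum ----
def sumsFrom (s : Int) : List Int → List Int
  | [] => []
  | x :: t => (s + x) :: sumsFrom (s + x) t

theorem psumFold_eq (xs : List Int) :
    ∀ (acc : List Int) (y : Int),
      xs.foldl (fun ps x => ps ++ [PySem.List.pyGetD ps (-1) 0 + x]) (acc ++ [y]) =
        acc ++ y :: sumsFrom y xs := by
  induction xs with
  | nil => intro acc y; simp [sumsFrom]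
  | cons x t ih =>
    intro acc y
    rw [List.foldl_cons, PySem.List.pyGetD_neg_one_append_singleton]
    have h1 : acc ++ [y] ++ [y + x] = (acc ++ [y]) ++ [y + x] := rfl
    rw [h1, ih (acc ++ [y]) (y + x)]
    simp [sumsFrom]

theorem psumB_eq (xs : List Int) : psumB xs = 0 :: sumsFrom 0 xs := by
  have h := psumFold_eq xs [] 0
  simpa [psumB] using h

theorem sumsFrom_getD (xs : List Int) :
    ∀ (s : Int) (j : Nat), j ≤ xs.length →
      (s :: sumsFrom s xs).getD j 0 = s + (xs.take j).sum := by
  induction xs with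
  | nil =>
    intro s j hj
    simp only [List.length_nil, Nat.le_zero] at hj
    subst hj; simp [sumsFrom]
  | cons x t ih =>
    intro s j hj
    match j with
    | 0 => simp
    | k + 1 =>
      show ((s + x) :: sumsFrom (s + x) t).getD k 0 = s + ((x :: t).take (k + 1)).sum
      rw [ih (s + x) k (by simpa using hj)]
      simp; ring

theorem psumB_getD (xs : List Int) (j : Nat) (hj : j ≤ xs.length) :
    (psumB xs).getD j 0 = (xs.take j).sum := by
  rw [psumB_eq, sumsFrom_getD xs 0 j hj, zero_add]

-- ---- B side ----
theorem costB_eq (price meter : List Int) (n : Nat)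
    (hn : n < price.length) (hm : n ≤ meter.length) :
    ∀ (fuel r : Nat), r ≤ fuel → r ≤ n →
      costB price (psumB (meter.take n)) fuel r = S meter price 0 r := by
  intro fuel
  induction fuel with
  | zero =>
    intro r hrf hrn
    have hr0 : r = 0 := by omega
    subst hr0; simp [costB, S]
  | succ fuel ih =>
    intro r hrf hrn
    by_cases hr0 : r = 0
    · subst hr0; simp [costB, S]
    · rw [show costB price (psumB (meter.take n)) (fuel + 1) r =
        (if r = 0 then 0 else
          let pre := PySem.List.slice price none (some (r : Int))
          let v := (PySem.List.min? pre (fun x => x)).getD 0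
          let m := (PySem.List.index? pre v).getD 0
          costB price (psumB (meter.take n)) fuel m +
            v * (PySem.List.pyGetD (psumB (meter.take n)) (r : Int) 0 -
                 PySem.List.pyGetD (psumB (meter.take n)) (m : Int) 0)) from rfl]
      rw [if_neg hr0]
      set pre := PySem.List.slice price none (some (r : Int)) with hpre
      have hpre' : pre = price.take r := by
        rw [hpre, PySem.List.slice_to_natCast]
      have hprelen : pre.length = r := by
        rw [hpre']; simp; omega
      have hprene : pre ≠ [] := by
        intro h; rw [h] at hprelen; simp at hprelen; omega
      obtain ⟨v, hv⟩ : ∃ v, PySem.List.min? pre (fun x => x) = some v := by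
        cases h : PySem.List.min? pre (fun x => x) with
        | none => exact absurd ((PySem.List.min?_eq_none_iff pre (fun x => x)).mp h) hprene
        | some v => exact ⟨v, rfl⟩
      have hvmem : v ∈ pre := PySem.List.min?_mem hv
      have hvmin : ∀ y ∈ pre, v ≤ y := PySem.List.min?_isMin hv
      obtain ⟨m, hmidx⟩ : ∃ m, PySem.List.index? pre v = some m := by
        cases h : PySem.List.index? pre v with
        | none => exact absurd hvmem ((PySem.List.index?_eq_none_iff pre v).mp h)
        | some m => exact ⟨m, rfl⟩
      obtain ⟨hmlt, hpm_eq, _⟩ := PySem.List.getElem_of_index?_eq_some hmidx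
      have hmr : m < r := by rw [hprelen] at hmlt; exact hmlt
      have hjpre : ∀ j : Nat, j < r → price.getD j 0 = pre.getD j 0 := by
        intro j hj
        have hjp : j < price.length := by omega
        have hjq : j < pre.length := by rw [hprelen]; exact hj
        rw [List.getD_eq_getElem _ _ hjp, List.getD_eq_getElem _ _ hjq]
        simp [hpre']
      have hpricem : price.getD m 0 = v := by
        rw [hjpre m hmr, List.getD_eq_getElem _ _ hmlt]; exact hpm_eq
      have hpmconst : ∀ j, m ≤ j → j < r → pm price j = v := by
        intro j hmj hjr
        have hle : pm price j ≤ v := by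
          rw [← hpricem]; exact pm_le price j m hmj
        have hge : v ≤ pm price j := by
          obtain ⟨j', hj', heq⟩ := pm_mem price j
          have hj'r : j' < r := by omega
          have hj'q : j' < pre.length := by rw [hprelen]; exact hj'r
          rw [heq, hjpre j' hj'r, List.getD_eq_getElem _ _ hj'q]
          exact hvmin _ (List.getElem_mem _)
        omega
      simp only [hv, hmidx, Option.getD_some]
      have hih := ih m (by omega) (by omega)
      rw [hih]
      have hmslen : (meter.take n).length = n := by simp; omega
      have hpsr : PySem.List.pyGetD (psumB (meter.take n)) (r : Int) 0 =
          ((meter.take n).take r).sum := by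
        rw [PySem.List.pyGetD_natCast, psumB_getD _ r (by omega)]
      have hpsm : PySem.List.pyGetD (psumB (meter.take n)) (m : Int) 0 =
          ((meter.take n).take m).sum := by
        rw [PySem.List.pyGetD_natCast, psumB_getD _ m (by omega)]
      rw [hpsr, hpsm]
      have hsum : ((meter.take n).take r).sum =
          ((meter.take n).take m).sum + msum (meter.take n) m (r - m) := by
        have := take_sum_msum (meter.take n) m (r - m) (by omega)
        rwa [show m + (r - m) = r from by omega] at this
      rw [hsum]
      have hmc : msum (meter.take n) m (r - m) = msum meter m (r - m) := by
        apply msum_congr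
        intro j h1 h2
        have hjn : j < n := by omega
        have hjm : j < meter.length := by omega
        rw [List.getD_eq_getElem _ _ (by rw [hmslen]; exact hjn),
            List.getD_eq_getElem _ _ hjm]
        exact List.getElem_take
      rw [hmc]
      have hsplit : S meter price 0 r = S meter price 0 m + S meter price m (r - m) := by
        have := S_split meter price 0 m (r - m)
        rwa [show m + (r - m) = r from by omega, Nat.zero_add] at this
      rw [hsplit, S_const meter price v m (r - m) (fun j h1 h2 => hpmconst j h1 (by omega))]
      ring

-- ===== VERDICT (by name: the statement is the Claim_ definition above) =====
theorem solution_spec : Claim_equal_solution := by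
  intro city meter price _ hpre
  unfold Spec_solution solution solution_alt
  by_cases h1 : city - 1 ≤ 0
  · rw [if_pos h1]
    rw [show (city - 1).toNat = 0 from by omega]
    rfl
  · rw [if_neg h1]
    obtain hle | ⟨hm, hp⟩ := hpre
    · omega
    set n := (city - 1).toNat with hn
    have hcn : (n : Int) = city - 1 := Int.toNat_of_nonneg (by omega)
    have hnp : n < price.length := by omega
    have hnm : n ≤ meter.length := by omega
    rw [show PySem.List.slice meter none (some (city - 1)) =
          PySem.List.slice meter none (some ((n : Nat) : Int)) from by rw [hcn],
        PySem.List.slice_to_natCast]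
    rw [costB_eq price meter n hnp hnm n n (le_refl n) (le_refl n)]
    rw [loopA_eq meter price n 0 0 price (by omega) rfl (fun j _ => rfl)]
    rw [zero_add]
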